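-- pv_equiv track=rewrite | github.com/hjcdg1/self-ps | huffman.py | check_full
-- ===== SOURCE A (Python) =====
-- def prefix (l1, l2) :
--     if (len(l1) >= len(l2)) :
--         l1 = l1[0:len(l2)]
--     else :
--         l2 = l2[0:len(l1)]
--     for (i, j) in zip(l1, l2) :
--         if (i != j) :
--             return False
--     return True
--
-- def check_full (tree, Z, ends, prev) :
--     for c in prev :
--         pre = c[0:len(c)-1]
--         pre.append('1' if (c[len(c)-1] == '0') else '0')
--
--         isFound = False
--         for p in prev :
--             if (prefix(p, pre)) :
--                 isFound = True
--                 break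
--         if (not isFound) :
--             return False
--     return True
-- ===== SOURCE B (Python) =====
-- def check_full(tree, Z, ends, prev):
--     # One pass to index all prefixes of the codes; each sibling-prefix query
--     # is then answered by hash lookups instead of a scan over all codes.
--     P = {tuple(p[:k]) for p in prev for k in range(len(p) + 1)}
--     C = {tuple(p) for p in prev}
--     for c in prev:
--         pre = tuple(c[:-1]) + (('1' if c[-1] == '0' else '0'),)
--         if pre not in P and not any(pre[:k] in C for k in range(len(pre) + 1)):
--             return False
--     return True
-- ===== Notes on version B (the rewrite author's own statement) =====
-- stated objective: alternative
-- what changed: A scans the whole code list for every code, comparing lists element by element (prefix()); B builds one hash set of all code prefixes and the set of codes, then answers each sibling-prefix query by set-membership lookups, removing the inner scan.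
import Mathlib
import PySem

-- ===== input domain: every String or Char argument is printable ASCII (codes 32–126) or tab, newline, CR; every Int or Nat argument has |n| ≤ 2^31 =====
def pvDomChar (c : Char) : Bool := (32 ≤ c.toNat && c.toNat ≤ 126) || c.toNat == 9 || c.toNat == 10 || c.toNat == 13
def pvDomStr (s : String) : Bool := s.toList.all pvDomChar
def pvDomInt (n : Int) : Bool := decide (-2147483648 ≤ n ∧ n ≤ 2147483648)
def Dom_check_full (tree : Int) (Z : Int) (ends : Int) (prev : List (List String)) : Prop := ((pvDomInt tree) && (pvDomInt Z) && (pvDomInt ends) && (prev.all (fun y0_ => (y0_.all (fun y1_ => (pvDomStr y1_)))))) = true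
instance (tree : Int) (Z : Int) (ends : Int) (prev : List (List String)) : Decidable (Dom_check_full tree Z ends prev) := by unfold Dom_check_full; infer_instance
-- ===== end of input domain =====

-- B replaces A's inner scan over all codes (each compared element by element) with one
-- precomputed hash set of all code prefixes plus the code set, answering each
-- sibling-prefix query by membership lookups. Objective: alternative.

-- ===== PORT A =====
-- the zip loop of `prefix`: returns False on the first unequal pair
def pvZipEqLoop : List (String × String) → Bool
  | [] => true
  | (i, j) :: rest => if i ≠ j then false else pvZipEqLoop rest

-- `prefix(l1, l2)`: truncate the longer list, then the zip loop
def pvPrefix (l1 l2 : List String) : Bool :=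
  if l2.length ≤ l1.length then
    pvZipEqLoop ((PySem.List.slice l1 (some 0) (some (l2.length : Int))).zip l2)
  else
    pvZipEqLoop (l1.zip (PySem.List.slice l2 (some 0) (some (l1.length : Int))))

-- pre = c[0:len(c)-1] + [flip of c[len(c)-1]]; none = IndexError on an empty code
def pvPreA? (c : List String) : Option (List String) :=
  match PySem.List.pyGet? c ((c.length : Int) - 1) with
  | none => none
  | some last =>
      some (PySem.List.slice c (some 0) (some ((c.length : Int) - 1)) ++
            [if last = "0" then "1" else "0"])

-- inner `for p in prev` loop with the break
def pvFindA (full : List (List String)) (pre : List String) : Bool :=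
  match full with
  | [] => false
  | p :: rest => if pvPrefix p pre then true else pvFindA rest pre

-- outer `for c in prev` loop
def pvOuterA (full : List (List String)) : List (List String) → Bool
  | [] => true
  | c :: rest =>
      match pvPreA? c with
      | none => false  -- Python raises IndexError here; excluded by Pre_
      | some pre => if pvFindA full pre then pvOuterA full rest else false

def check_full (tree : Int) (Z : Int) (ends : Int) (prev : List (List String)) : Bool :=
  pvOuterA prev prev

-- ===== PORT B =====
-- P = {tuple(p[:k]) for p in prev for k in range(len(p)+1)}
def pvPrefixPool (prev : List (List String)) : PySem.Set (List String) :=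
  PySem.Set.ofList (prev.flatMap fun p =>
    (PySem.List.pyRange 0 ((p.length : Int) + 1)).map fun k =>
      PySem.List.slice p none (some k))

-- pre = tuple(c[:-1]) + (flip of c[-1],); none = IndexError on an empty code
def pvPreB? (c : List String) : Option (List String) :=
  match PySem.List.pyGet? c (-1) with
  | none => none
  | some last =>
      some (PySem.List.slice c none (some (-1)) ++ [if last = "0" then "1" else "0"])

-- the `for c in prev` loop of B
def pvOuterB (P C : PySem.Set (List String)) : List (List String) → Bool
  | [] => true
  | c :: rest =>
      match pvPreB? c with
      | none => false  -- Python raises IndexError here; excluded by Pre_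
      | some pre =>
          if !(PySem.Set.contains P pre) &&
             !((PySem.List.pyRange 0 ((pre.length : Int) + 1)).any fun k =>
                 PySem.Set.contains C (PySem.List.slice pre none (some k))) then
            false
          else
            pvOuterB P C rest

def check_full_alt (tree : Int) (Z : Int) (ends : Int) (prev : List (List String)) : Bool :=
  pvOuterB (pvPrefixPool prev) (PySem.Set.ofList prev) prev

-- ===== PRECONDITION & SPEC =====
-- Pre_ excludes inputs with an empty code list in prev: there c[-1] raises IndexError in A (and in B).
def Pre_check_full (tree : Int) (Z : Int) (ends : Int) (prev : List (List String)) : Prop :=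
  ∀ c ∈ prev, c ≠ []
instance (tree : Int) (Z : Int) (ends : Int) (prev : List (List String)) : Decidable (Pre_check_full tree Z ends prev) := by unfold Pre_check_full; infer_instance

def pvWitness_check_full : Int × Int × Int × List (List String) := (0, 0, 0, [["0"], ["1"]])

def Spec_check_full (tree : Int) (Z : Int) (ends : Int) (prev : List (List String)) (out : Bool) : Prop := out = check_full_alt tree Z ends prev
instance (tree : Int) (Z : Int) (ends : Int) (prev : List (List String)) (out : Bool) : Decidable (Spec_check_full tree Z ends prev out) := by unfold Spec_check_full; infer_instance

-- ===== CLAIM (what is proved, stated in full; the proofs are below) =====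
def Claim_equal_check_full : Prop := ∀ (tree : Int) (Z : Int) (ends : Int) (prev : List (List String)), Dom_check_full tree Z ends prev → Pre_check_full tree Z ends prev → Spec_check_full tree Z ends prev (check_full tree Z ends prev)

-- ===== LEMMAS AND PROOFS =====

-- the zip loop on equal-length lists decides equality
theorem pvZipEqLoop_iff (xs ys : List String) (h : xs.length = ys.length) :
    pvZipEqLoop (xs.zip ys) = true ↔ xs = ys := by
  induction xs generalizing ys with
  | nil => cases ys <;> simp [pvZipEqLoop] at h ⊢
  | cons a xs ih =>
    cases ys with
    | nil => simp at h
    | cons b ys =>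
      simp only [List.length_cons, Nat.add_right_cancel_iff] at h
      by_cases hab : a = b <;> simp [pvZipEqLoop, hab, ih ys h]

-- `prefix` decides the two-sided prefix relation
theorem pvPrefix_iff (l1 l2 : List String) :
    pvPrefix l1 l2 = true ↔ l1 <+: l2 ∨ l2 <+: l1 := by
  unfold pvPrefix
  by_cases h : l2.length ≤ l1.length
  · simp only [h, if_pos, PySem.List.slice_zero_start, PySem.List.slice_to_natCast]
    rw [pvZipEqLoop_iff _ _ (by simp; omega)]
    constructor
    · intro he; exact Or.inr (List.prefix_iff_eq_take.mpr he.symm)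
    · rintro (hp | hp)
      · have := hp.eq_of_length_le (le_antisymm (hp.length_le) h ▸ le_refl _)
        subst this; simp
      · exact (List.prefix_iff_eq_take.mp hp).symm
  · simp only [h, if_neg, PySem.List.slice_zero_start, PySem.List.slice_to_natCast,
      not_false_iff]
    rw [pvZipEqLoop_iff _ _ (by simp; omega)]
    constructor
    · intro he; exact Or.inl (List.prefix_iff_eq_take.mpr he)
    · rintro (hp | hp)
      · exact List.prefix_iff_eq_take.mp hp
      · exact absurd hp.length_le (by omega)

-- A's inner loop is an existential scan
theorem pvFindA_iff (full : List (List String)) (pre : List String) :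
    pvFindA full pre = true ↔ ∃ p ∈ full, (p <+: pre ∨ pre <+: p) := by
  induction full with
  | nil => simp [pvFindA]
  | cons p rest ih =>
    by_cases hp : pvPrefix p pre = true
    · simp only [pvFindA, hp, if_true, true_iff]
      exact ⟨p, List.mem_cons_self .., (pvPrefix_iff p pre).mp hp⟩
    · have hb : pvPrefix p pre = false := by simpa using hp
      simp only [pvFindA, hb, Bool.false_eq_true, if_false, ih, List.mem_cons]
      constructor
      · rintro ⟨q, hq, hr⟩; exact ⟨q, Or.inr hq, hr⟩
      · rintro ⟨q, hq | hq, hr⟩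
        · exact absurd ((pvPrefix_iff p pre).mpr (hq ▸ hr)) hp
        · exact ⟨q, hq, hr⟩

-- membership in the prefix pool = "pre is a prefix of some code"
theorem mem_pvPrefixPool (prev : List (List String)) (pre : List String) :
    pre ∈ pvPrefixPool prev ↔ ∃ p ∈ prev, pre <+: p := by
  unfold pvPrefixPool
  rw [PySem.Set.mem_ofList]
  simp only [List.mem_flatMap, List.mem_map]
  constructor
  · rintro ⟨p, hp, k, hk, rfl⟩
    refine ⟨p, hp, ?_⟩
    have : ((p.length : Int) + 1) = ((p.length + 1 : Nat) : Int) := by push_cast; ring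
    rw [this, PySem.List.pyRange_zero_natCast] at hk
    obtain ⟨m, _, rfl⟩ := List.mem_map.mp hk
    rw [PySem.List.slice_to_natCast]
    exact List.take_prefix m p
  · rintro ⟨p, hp, hpre⟩
    refine ⟨p, hp, (pre.length : Int), ?_, ?_⟩
    · have : ((p.length : Int) + 1) = ((p.length + 1 : Nat) : Int) := by push_cast; ring
      rw [this, PySem.List.pyRange_zero_natCast]
      exact List.mem_map.mpr ⟨pre.length, List.mem_range.mpr (by
        have := hpre.length_le; omega), rfl⟩
    · rw [PySem.List.slice_to_natCast]
      exact (List.prefix_iff_eq_take.mp hpre).symm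
  
-- B's prefix-of-pre scan = "some code is a prefix of pre"
theorem pvAnyScan_iff (prev : List (List String)) (pre : List String) :
    ((PySem.List.pyRange 0 ((pre.length : Int) + 1)).any fun k =>
        PySem.Set.contains (PySem.Set.ofList prev) (PySem.List.slice pre none (some k))) = true
      ↔ ∃ p ∈ prev, p <+: pre := by
  simp only [List.any_eq_true, PySem.Set.contains, List.contains_iff_mem]
  have hcast : ((pre.length : Int) + 1) = ((pre.length + 1 : Nat) : Int) := by push_cast; ring
  rw [hcast, PySem.List.pyRange_zero_natCast]
  constructor
  · rintro ⟨k, hk, hmem⟩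
    obtain ⟨m, _, rfl⟩ := List.mem_map.mp hk
    rw [PySem.List.slice_to_natCast] at hmem
    exact ⟨pre.take m, PySem.Set.mem_ofList prev _ |>.mp hmem, List.take_prefix m pre⟩
  · rintro ⟨p, hp, hpre⟩
    refine ⟨(p.length : Int), ?_, ?_⟩
    · exact List.mem_map.mpr ⟨p.length, List.mem_range.mpr (by have := hpre.length_le; omega), rfl⟩
    · rw [PySem.List.slice_to_natCast, (List.prefix_iff_eq_take.mp hpre).symm]
      exact PySem.Set.mem_ofList prev p |>.mpr hp

-- on a nonempty code the two pre-constructions agree (and return a value)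
theorem pvPre_eq (c : List String) (hc : c ≠ []) : pvPreA? c = pvPreB? c ∧ pvPreA? c ≠ none := by
  have hlen : 1 ≤ c.length := List.length_pos_of_ne_nil hc
  have hA : ((c.length : Int) - 1) = ((c.length - 1 : Nat) : Int) := by omega
  have hgA : PySem.List.pyGet? c ((c.length : Int) - 1) = (getElem? c (c.length - 1)) := by
    rw [hA, PySem.List.pyGet?_natCast]
  have hgB : PySem.List.pyGet? c (-1) = (getElem? c (c.length - 1)) := by
    simp only [PySem.List.pyGet?, PySem.List.pyIdx?]
    have h1 : ¬ (0 : Int) ≤ -1 := by omega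
    have h2 : -(c.length : Int) ≤ -1 := by omega
    simp [h2]
  have hsl : PySem.List.slice c (some 0) (some ((c.length : Int) - 1)) =
      PySem.List.slice c none (some (-1)) := by
    rw [PySem.List.slice_zero_start, PySem.List.slice_to_neg_one, hA,
      PySem.List.slice_to_natCast, List.dropLast_eq_take]
  have hsome : (getElem? c (c.length - 1)).isSome := by
    rw [List.getElem?_eq_getElem (by omega)]; rfl
  obtain ⟨last, hlast⟩ := Option.isSome_iff_exists.mp hsome
  constructor
  · unfold pvPreA? pvPreB?
    rw [hgA, hgB, hlast, hsl]
  · unfold pvPreA?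
    rw [hgA, hlast]
    simp

-- the two outer loops agree, element by element
theorem pvOuter_eq (prev : List (List String)) (l : List (List String))
    (hl : ∀ c ∈ l, c ≠ []) :
    pvOuterA prev l = pvOuterB (pvPrefixPool prev) (PySem.Set.ofList prev) l := by
  induction l with
  | nil => rfl
  | cons c rest ih =>
    have hc := hl c (List.mem_cons_self ..)
    obtain ⟨heq, hne⟩ := pvPre_eq c hc
    obtain ⟨pre, hpre⟩ : ∃ pre, pvPreA? c = some pre := by
      cases h : pvPreA? c with
      | none => exact absurd h hne
      | some pre => exact ⟨pre, rfl⟩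
    have hfind : pvFindA prev pre =
        (PySem.Set.contains (pvPrefixPool prev) pre ||
         (PySem.List.pyRange 0 ((pre.length : Int) + 1)).any fun k =>
           PySem.Set.contains (PySem.Set.ofList prev) (PySem.List.slice pre none (some k))) := by
      rw [Bool.eq_iff_iff, pvFindA_iff, Bool.or_eq_true, pvAnyScan_iff]
      have hP : PySem.Set.contains (pvPrefixPool prev) pre = true ↔ pre ∈ pvPrefixPool prev := by
        simp [PySem.Set.contains]
      rw [hP, mem_pvPrefixPool]
      constructor
      · rintro ⟨p, hp, hr | hr⟩
        · exact Or.inr ⟨p, hp, hr⟩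
        · exact Or.inl ⟨p, hp, hr⟩
      · rintro (⟨p, hp, hr⟩ | ⟨p, hp, hr⟩)
        · exact ⟨p, hp, Or.inr hr⟩
        · exact ⟨p, hp, Or.inl hr⟩
    have ihr := ih (fun c hc => hl c (List.mem_cons_of_mem _ hc))
    show (match pvPreA? c with
      | none => false
      | some pre => if pvFindA prev pre then pvOuterA prev rest else false) = _
    rw [hpre]
    show _ = (match pvPreB? c with
      | none => false
      | some pre => if !(PySem.Set.contains (pvPrefixPool prev) pre) && !(_) then false
          else pvOuterB _ _ rest)
    rw [← heq, hpre]
    simp only [hfind, ihr]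
    cases PySem.Set.contains (pvPrefixPool prev) pre <;>
      cases ((PySem.List.pyRange 0 ((pre.length : Int) + 1)).any fun k =>
        PySem.Set.contains (PySem.Set.ofList prev) (PySem.List.slice pre none (some k))) <;> rfl

-- ===== VERDICT (by name: the statement is the Claim_ definition above) =====
theorem check_full_spec : Claim_equal_check_full := by
  intro tree Z ends prev _ hpre
  unfold Spec_check_full check_full check_full_alt
  exact pvOuter_eq prev prev hpre
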